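-- pv_equiv track=rewrite | github.com/yardbirds0/------ | components/chat/services/search_engine.py | highlight_match
-- ===== SOURCE A (Python) =====
-- def highlight_match(text: str, query: str) -> str:
--     """
--     生成带高亮标记的文本（用于UI显示）
--
--     Args:
--         text: 原始文本
--         query: 搜索查询
--
--     Returns:
--         带<mark>标签的HTML字符串
--
--     Example:
--         >>> SearchEngine.highlight_match("OpenAI GPT-4", "gpt")
--         'OpenAI <mark>GPT</mark>-4'
--     """
--     if not query or not query.strip():
--         return text
--
--     query_lower = query.strip().lower()
--     text_lower = text.lower()
--
--     # 找到所有匹配位置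
--     result = []
--     last_end = 0
--
--     while True:
--         start_pos = text_lower.find(query_lower, last_end)
--         if start_pos == -1:
--             break
--
--         # 添加匹配前的文本
--         result.append(text[last_end:start_pos])
--
--         # 添加高亮的匹配文本
--         end_pos = start_pos + len(query_lower)
--         result.append(f"<mark>{text[start_pos:end_pos]}</mark>")
--
--         last_end = end_pos
--
--     # 添加剩余文本
--     result.append(text[last_end:])
--
--     return "".join(result)
-- ===== SOURCE B (Python) =====
-- def highlight_match(text: str, query: str) -> str:
--     # Single left-to-right scan: at each position either a match starts (wrap it
--     # in <mark> and jump over it) or one character is copied. No find()/slice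
--     # bookkeeping with last_end.
--     if not query or not query.strip():
--         return text
--     q = query.strip().lower()
--     tl = text.lower()
--     m = len(q)
--     out = []
--     i = 0
--     while i < len(text):
--         if tl.startswith(q, i):
--             out.append("<mark>" + text[i:i + m] + "</mark>")
--             i += m
--         else:
--             out.append(text[i])
--             i += 1
--     return "".join(out)
-- ===== Notes on version B (the rewrite author's own statement) =====
-- stated objective: alternative
-- what changed: Replaces the find()/last_end jump loop that joins slice pieces with a single position-by-position scan that at each index either wraps a starting match or copies one character.
import Mathlib
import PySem

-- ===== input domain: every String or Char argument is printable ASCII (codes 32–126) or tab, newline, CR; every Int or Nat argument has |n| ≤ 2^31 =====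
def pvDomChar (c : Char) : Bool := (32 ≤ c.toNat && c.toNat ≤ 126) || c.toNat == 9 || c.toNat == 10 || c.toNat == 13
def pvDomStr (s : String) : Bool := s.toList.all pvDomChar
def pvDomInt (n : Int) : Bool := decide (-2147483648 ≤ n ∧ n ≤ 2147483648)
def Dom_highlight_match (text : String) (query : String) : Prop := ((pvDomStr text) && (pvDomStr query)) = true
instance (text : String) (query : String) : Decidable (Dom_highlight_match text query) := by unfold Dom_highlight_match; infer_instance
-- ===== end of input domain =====

-- B replaces A's find()/last_end jump loop with a single position-by-position scan (alternative decomposition, same cost).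

-- ===== PORT A =====
-- A's while-loop: state last_end (Int) and the growing list of string pieces; "".join(result) = flatten.
-- The fuel (text.length + 1) only bounds the loop: with a non-empty query, last_end strictly
-- increases each iteration, so the fuel is never exhausted on the inputs A is run on.
def hlA_loop (t tl ql : List Char) : Nat → Int → List (List Char) → List (List Char)
  | 0, _, acc => acc
  | fuel+1, last_end, acc =>
    let sp := PySem.Chars.findFrom tl ql last_end          -- text_lower.find(query_lower, last_end)
    if sp = -1 then acc ++ [PySem.List.slice t (some last_end) none]   -- result.append(text[last_end:])
    else
      let ep := sp + (ql.length : Int)                     -- end_pos = start_pos + len(query_lower)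
      hlA_loop t tl ql fuel ep
        (acc ++ [PySem.List.slice t (some last_end) (some sp),        -- text[last_end:start_pos]
                 ['<','m','a','r','k','>'] ++ PySem.List.slice t (some sp) (some ep) ++ ['<','/','m','a','r','k','>']])

def highlight_match (text : String) (query : String) : String :=
  if query.toList.isEmpty || (PySem.Chars.strip query.toList).isEmpty then text
  else
    let ql := PySem.Chars.lower (PySem.Chars.strip query.toList)
    let t := text.toList
    let tl := PySem.Chars.lower t
    String.ofList (hlA_loop t tl ql (t.length + 1) 0 []).flatten

-- ===== PORT B =====
-- B's index loop 'while i < len(text)'; the state i is carried as the pair of suffixes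
-- (text[i:], text_lower[i:]); tl.startswith(q, i) is startswith on the suffix.
-- The fuel (text.length) only bounds the loop: each step consumes at least one character.
def hlB_scan (q : List Char) : Nat → List Char → List Char → List Char
  | _, [], _ => []
  | 0, _, _ => []
  | fuel+1, c :: t', tl =>
    if PySem.Chars.startswith tl q then
      ['<','m','a','r','k','>'] ++ (c :: t').take q.length ++ ['<','/','m','a','r','k','>']
        ++ hlB_scan q fuel ((c :: t').drop q.length) (tl.drop q.length)
    else
      c :: hlB_scan q fuel t' (tl.drop 1)

def highlight_match_alt (text : String) (query : String) : String :=
  if query.toList.isEmpty || (PySem.Chars.strip query.toList).isEmpty then text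
  else
    let q := PySem.Chars.lower (PySem.Chars.strip query.toList)
    let t := text.toList
    String.ofList (hlB_scan q t.length t (PySem.Chars.lower t))

-- ===== PRECONDITION & SPEC =====
def Spec_highlight_match (text : String) (query : String) (out : String) : Prop := out = highlight_match_alt text query
instance (text : String) (query : String) (out : String) : Decidable (Spec_highlight_match text query out) := by unfold Spec_highlight_match; infer_instance

-- ===== CLAIM (what is proved, stated in full; the proofs are below) =====
def Claim_equal_highlight_match : Prop := ∀ (text : String) (query : String), Dom_highlight_match text query → Spec_highlight_match text query (highlight_match text query)

-- ===== LEMMAS AND PROOFS =====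

-- first occurrence position of q in s (none = no occurrence): the common characterisation
-- of A's find() and of the position where B's scan first takes the match branch
def fm (q : List Char) : List Char → Option Nat
  | [] => if q = [] then some 0 else none
  | c :: s' => if q.isPrefixOf (c :: s') then some 0 else (fm q s').map (· + 1)

theorem go_fm (q s : List Char) (k : Nat) :
    PySem.Chars.find.go q s k = (match fm q s with | none => -1 | some j => (k : Int) + j) := by
  induction s generalizing k with
  | nil =>
    simp [PySem.Chars.find.go, fm]
    split_ifs with h <;> simp_all
  | cons c s' ih =>
    simp only [PySem.Chars.find.go, fm]
    split_ifs with h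
    · simp
    · rw [ih]
      cases fm q s' with
      | none => simp
      | some v => simp; ring

theorem find_fm (q s : List Char) :
    PySem.Chars.find s q = (match fm q s with | none => -1 | some j => (j : Int)) := by
  rw [PySem.Chars.find, go_fm]; cases fm q s <;> simp

theorem findFrom_fm (tl q : List Char) (i : Nat) (h : i ≤ tl.length) :
    PySem.Chars.findFrom tl q (i : Int) none
      = (match fm q (tl.drop i) with | none => -1 | some j => ((i + j : Nat) : Int)) := by
  simp only [PySem.Chars.findFrom]
  have h1 : ¬ ((tl.length : Int) < (i : Int)) := by exact_mod_cast not_lt.mpr h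
  have h2 : ¬ ((i : Int) < 0) := by exact_mod_cast Int.not_lt.mpr (Int.natCast_nonneg i)
  simp only [h1, h2, if_false]
  rw [Int.toNat_natCast, Int.toNat_natCast, List.take_length, find_fm]
  cases hfm : fm q (tl.drop i) with
  | none => simp
  | some j =>
    split
    next hneg => simp at hneg
    next => push_cast; ring

theorem findFrom_none (tl q : List Char) (i : Nat) (h : i ≤ tl.length)
    (hfm : fm q (tl.drop i) = none) : PySem.Chars.findFrom tl q (i : Int) none = -1 := by
  rw [findFrom_fm tl q i h, hfm]

theorem findFrom_some (tl q : List Char) (i j : Nat) (h : i ≤ tl.length)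
    (hfm : fm q (tl.drop i) = some j) :
    PySem.Chars.findFrom tl q (i : Int) none = ((i + j : Nat) : Int) := by
  rw [findFrom_fm tl q i h, hfm]

theorem fm_bound (q s : List Char) : ∀ j, fm q s = some j → j + q.length ≤ s.length := by
  induction s with
  | nil => intro j hj; simp [fm] at hj; simp [hj.1, hj.2]
  | cons c s' ih =>
    intro j hj
    simp only [fm] at hj
    split_ifs at hj with h
    · cases hj
      simpa using (List.isPrefixOf_iff_prefix.mp h).length_le
    · simp only [Option.map_eq_some_iff] at hj
      obtain ⟨j', hj', rfl⟩ := hj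
      have := ih j' hj'
      simp; omega

-- B's scan does not consume more fuel than text.length when the query is non-empty
theorem scan_fuel (q : List Char) (hq : q ≠ []) :
    ∀ N t tl fuel, t.length ≤ N → t.length ≤ fuel →
      hlB_scan q fuel t tl = hlB_scan q t.length t tl := by
  intro N
  induction N with
  | zero =>
    intro t tl fuel h1 _
    have : t = [] := List.eq_nil_of_length_eq_zero (by omega)
    subst this
    cases fuel <;> rfl
  | succ N ih =>
    intro t tl fuel h1 h2
    cases t with
    | nil => cases fuel <;> rfl
    | cons c t' =>
      have hm : 1 ≤ q.length := List.length_pos_iff.mpr hq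
      simp only [List.length_cons] at h1 h2
      obtain ⟨f, rfl⟩ : ∃ f, fuel = f + 1 := ⟨fuel - 1, by omega⟩
      simp only [hlB_scan, List.length_cons]
      split_ifs with h
      · congr 1
        rw [ih _ _ f (by simp; omega) (by simp; omega),
            ih _ _ t'.length (by simp; omega) (by simp; omega)]
      · congr 1
        exact (ih t' _ f (by omega) (by omega)).trans (ih t' _ t'.length (by omega) (le_refl _)).symm

-- no occurrence: B's scan copies the text unchanged
theorem scan_none (q : List Char) (_hq : q ≠ []) :
    ∀ t tl, fm q tl = none → tl.length = t.length → hlB_scan q t.length t tl = t := by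
  intro t
  induction t with
  | nil => intro tl _ _; rfl
  | cons c t' ih =>
    intro tl hfm hlen
    cases tl with
    | nil => simp at hlen
    | cons d tl' =>
      simp only [fm] at hfm
      split_ifs at hfm with h
      · simp only [Option.map_eq_none_iff] at hfm
        simp only [hlB_scan, List.length_cons, PySem.Chars.startswith]
        rw [if_neg h]
        simp only [List.drop_one, List.tail_cons]
        rw [ih tl' hfm (by simpa using hlen)]

-- first occurrence at j: B's scan copies j characters, wraps the match, and continues after it
theorem scan_some (q : List Char) (hq : q ≠ []) :
    ∀ j t tl, fm q tl = some j → tl.length = t.length →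
      hlB_scan q t.length t tl
        = t.take j ++ ['<','m','a','r','k','>'] ++ (t.drop j).take q.length ++ ['<','/','m','a','r','k','>']
          ++ hlB_scan q (t.drop (j + q.length)).length (t.drop (j + q.length)) (tl.drop (j + q.length)) := by
  intro j
  induction j with
  | zero =>
    intro t tl hfm hlen
    have hm : 1 ≤ q.length := List.length_pos_iff.mpr hq
    have hpre : q.isPrefixOf tl := by
      cases tl with
      | nil => simp [fm, hq] at hfm
      | cons d tl' =>
        simp only [fm] at hfm
        split_ifs at hfm with h
        · exact h
        · simp only [Option.map_eq_some_iff] at hfm; omega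
    have hbd := fm_bound q tl 0 hfm
    cases t with
    | nil => exfalso; rw [List.length_nil] at hlen; omega
    | cons c t' =>
      simp only [List.length_cons, hlB_scan, PySem.Chars.startswith, hpre, if_true]
      have hfuel := scan_fuel q hq t'.length ((c :: t').drop q.length) (tl.drop q.length) t'.length
        (by simp; omega) (by simp; omega)
      rw [hfuel]
      simp
  | succ j ih =>
    intro t tl hfm hlen
    have hm : 1 ≤ q.length := List.length_pos_iff.mpr hq
    cases tl with
    | nil => simp [fm, hq] at hfm
    | cons d tl' =>
      simp only [fm] at hfm
      split_ifs at hfm with h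
      · simp at hfm
      · simp only [Option.map_eq_some_iff] at hfm
        obtain ⟨j', hj', hj1⟩ := hfm
        have hjj : j' = j := by omega
        subst hjj
        cases t with
        | nil => simp at hlen
        | cons c t' =>
          simp only [List.length_cons, hlB_scan, PySem.Chars.startswith]
          rw [if_neg h]
          simp only [List.drop_one, List.tail_cons]
          rw [ih t' tl' hj' (by simpa using hlen)]
          simp [List.take_succ_cons, List.drop_succ_cons, Nat.succ_add]

-- the invariant: A's loop from last_end = i produces exactly what B's scan produces on the suffixes at i
theorem loop_eq (t tl q : List Char) (hq : q ≠ []) (hlen : tl.length = t.length) :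
    ∀ N fuel i acc, t.length - i ≤ N → i ≤ t.length → t.length - i + 1 ≤ fuel →
      (hlA_loop t tl q fuel (i : Int) acc).flatten
        = acc.flatten ++ hlB_scan q (t.drop i).length (t.drop i) (tl.drop i) := by
  intro N
  induction N with
  | zero =>
    intro fuel i acc h1 h2 h3
    have hi : i = t.length := by omega
    subst hi
    obtain ⟨f, rfl⟩ : ∃ f, fuel = f + 1 := ⟨fuel - 1, by omega⟩
    simp only [hlA_loop]
    have hdrop : tl.drop t.length = [] := by
      apply List.drop_eq_nil_of_le; omega
    rw [findFrom_none tl q t.length (by omega) (by simp [hdrop, fm, hq])]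
    have hdt : t.drop t.length = [] := List.drop_eq_nil_of_le (le_refl _)
    simp [hdt, PySem.List.slice_from _ (Int.natCast_nonneg _), hlB_scan]
  | succ N ih =>
    intro fuel i acc h1 h2 h3
    obtain ⟨f, rfl⟩ : ∃ f, fuel = f + 1 := ⟨fuel - 1, by omega⟩
    simp only [hlA_loop]
    cases hfm : fm q (tl.drop i) with
    | none =>
      rw [findFrom_none tl q i (by omega) hfm, if_pos rfl]
      rw [scan_none q hq (t.drop i) (tl.drop i) hfm (by simp [hlen])]
      simp [PySem.List.slice_from _ (Int.natCast_nonneg _)]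
    | some j =>
      have hm : 1 ≤ q.length := List.length_pos_iff.mpr hq
      have hbd := fm_bound q (tl.drop i) j hfm
      rw [List.length_drop] at hbd
      rw [findFrom_some tl q i j (by omega) hfm, if_neg (by omega)]
      have hep : ((i + j : Nat) : Int) + (q.length : Int) = ((i + j + q.length : Nat) : Int) := by push_cast; ring
      rw [hep]
      rw [ih f (i + j + q.length) _ (by omega) (by omega) (by omega)]
      rw [scan_some q hq j (t.drop i) (tl.drop i) hfm (by simp [hlen])]
      have e1 : PySem.List.slice t (some (i : Int)) (some ((i + j : Nat) : Int))
          = (t.drop i).take j := by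
        rw [PySem.List.slice_toNat _ (Int.natCast_nonneg _) (Int.natCast_nonneg _)]
        simp only [Int.toNat_natCast]
        congr 1
        omega
      have e2 : PySem.List.slice t (some ((i + j : Nat) : Int)) (some ((i + j + q.length : Nat) : Int))
          = (t.drop (i + j)).take q.length := by
        rw [PySem.List.slice_toNat _ (Int.natCast_nonneg _) (Int.natCast_nonneg _)]
        simp only [Int.toNat_natCast]
        congr 1
        omega
      rw [e1, e2]
      simp [List.drop_drop, Nat.add_assoc, List.append_assoc]

-- ===== VERDICT (by name: the statement is the Claim_ definition above) =====
theorem highlight_match_spec : Claim_equal_highlight_match := by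
  intro text query _
  unfold Spec_highlight_match highlight_match highlight_match_alt
  by_cases hg : (query.toList.isEmpty || (PySem.Chars.strip query.toList).isEmpty) = true
  · rw [if_pos hg, if_pos hg]
  · rw [if_neg hg, if_neg hg]
    have hq : PySem.Chars.lower (PySem.Chars.strip query.toList) ≠ [] := by
      simp only [Bool.or_eq_true, List.isEmpty_iff, not_or] at hg
      simp [PySem.Chars.lower]
      exact hg.2
    have hlen : (PySem.Chars.lower text.toList).length = text.toList.length := by
      simp [PySem.Chars.lower]
    have h := loop_eq text.toList (PySem.Chars.lower text.toList)
        (PySem.Chars.lower (PySem.Chars.strip query.toList)) hq hlen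
        text.toList.length (text.toList.length + 1) 0 [] (by omega) (by omega) (by omega)
    simp only [Nat.cast_zero, List.drop_zero, List.flatten_nil, List.nil_append] at h
    show String.ofList _ = String.ofList _
    rw [h]
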